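-- pv_equiv track=rewrite | github.com/kentontilford/hfsrb-final | scripts/render_profiles.py | _hospital_group_for
-- ===== SOURCE A (Python) =====
-- from typing import Dict, Any, Tuple, List
--
-- def _hospital_group_for(fid: str, fname: str) -> Tuple[str, int]:
--     # Return (label, order)
--     f = fid or ''
--     n = fname or ''
--     def starts(*prefixes: str) -> bool:
--         return any(f.startswith(px) for px in prefixes)
--     def name_starts(*prefixes: str) -> bool:
--         return any(n.startswith(px) for px in prefixes)
--
--     if starts('facility.') or name_starts('facility_', 'address_', 'license_', 'fein'):
--         return ('Facility', 10)
--     if starts('ownership.') or name_starts('ownership_', 'operator_', 'plant_owner'):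
--         return ('Ownership', 20)
--     if starts('cms.', 'hospital.characterization', 'chna.') or name_starts('cms_', 'hospital_characterization', 'chna_'):
--         return ('Organization & Certification', 30)
--     if starts('mgmt.contracts') or name_starts('mgmt_'):
--         return ('Management Contracts', 40)
--     if starts('utilization.med_surg') or name_starts('med_surg_'):
--         return ('Utilization — Medical-Surgical', 50)
--     if starts('utilization.icu') or name_starts('icu_'):
--         return ('Utilization — ICU', 55)
--     if starts('utilization.ob_gyn') or name_starts('ob_', 'gyn_', 'obgyn_'):
--         return ('Utilization — OB/GYN', 57)
--     if starts('utilization.pediatrics') or name_starts('peds_', 'pediatric_'):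
--         return ('Utilization — Pediatrics', 58)
--     if starts('utilization.nicu') or name_starts('nicu_', 'nn_icu_'):
--         return ('Utilization — NICU', 59)
--     if name_starts('ltc_', 'swing_'):
--         return ('Utilization — Long-Term Care & Swing', 60)
--     if name_starts('total_'):
--         return ('Totals', 70)
--     if name_starts('op_', 'obs_unit_'):
--         return ('Outpatient', 80)
--     if name_starts('pay_inp_'):
--         return ('Payer Mix — Inpatient', 90)
--     if starts('inpatients_by_race') or name_starts('race_inp_'):
--         return ('Inpatients by Race', 100)
--     if starts('inpatient_days_by_race') or name_starts('days_by_race_'):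
--         return ('Inpatient Days by Race', 110)
--     if starts('inpatients_by_ethnicity') or name_starts('eth_inp_'):
--         return ('Inpatients by Ethnicity', 120)
--     if starts('inpatient_days_by_ethnicity') or name_starts('days_by_eth_'):
--         return ('Inpatient Days by Ethnicity', 130)
--     if starts('surgery.or_class_c') or name_starts('or_rooms_', 'or_cases_', 'or_hours_'):
--         return ('Surgery — OR Class C', 140)
--     if starts('surgery.class_b') or name_starts('procB_'):
--         return ('Surgery — Class B', 150)
--     return ('Other', 999)
-- ===== SOURCE B (Python) =====
-- from typing import Optional, Tuple
--
-- # Flat (prefix, label, order) rules for the two keys, independently.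
-- _FID_RULES = [
--     ('facility.', 'Facility', 10),
--     ('ownership.', 'Ownership', 20),
--     ('cms.', 'Organization & Certification', 30),
--     ('hospital.characterization', 'Organization & Certification', 30),
--     ('chna.', 'Organization & Certification', 30),
--     ('mgmt.contracts', 'Management Contracts', 40),
--     ('utilization.med_surg', 'Utilization — Medical-Surgical', 50),
--     ('utilization.icu', 'Utilization — ICU', 55),
--     ('utilization.ob_gyn', 'Utilization — OB/GYN', 57),
--     ('utilization.pediatrics', 'Utilization — Pediatrics', 58),
--     ('utilization.nicu', 'Utilization — NICU', 59),
--     ('inpatients_by_race', 'Inpatients by Race', 100),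
--     ('inpatient_days_by_race', 'Inpatient Days by Race', 110),
--     ('inpatients_by_ethnicity', 'Inpatients by Ethnicity', 120),
--     ('inpatient_days_by_ethnicity', 'Inpatient Days by Ethnicity', 130),
--     ('surgery.or_class_c', 'Surgery — OR Class C', 140),
--     ('surgery.class_b', 'Surgery — Class B', 150),
-- ]
--
-- _NAME_RULES = [
--     ('facility_', 'Facility', 10),
--     ('address_', 'Facility', 10),
--     ('license_', 'Facility', 10),
--     ('fein', 'Facility', 10),
--     ('ownership_', 'Ownership', 20),
--     ('operator_', 'Ownership', 20),
--     ('plant_owner', 'Ownership', 20),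
--     ('cms_', 'Organization & Certification', 30),
--     ('hospital_characterization', 'Organization & Certification', 30),
--     ('chna_', 'Organization & Certification', 30),
--     ('mgmt_', 'Management Contracts', 40),
--     ('med_surg_', 'Utilization — Medical-Surgical', 50),
--     ('icu_', 'Utilization — ICU', 55),
--     ('ob_', 'Utilization — OB/GYN', 57),
--     ('gyn_', 'Utilization — OB/GYN', 57),
--     ('obgyn_', 'Utilization — OB/GYN', 57),
--     ('peds_', 'Utilization — Pediatrics', 58),
--     ('pediatric_', 'Utilization — Pediatrics', 58),
--     ('nicu_', 'Utilization — NICU', 59),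
--     ('nn_icu_', 'Utilization — NICU', 59),
--     ('ltc_', 'Utilization — Long-Term Care & Swing', 60),
--     ('swing_', 'Utilization — Long-Term Care & Swing', 60),
--     ('total_', 'Totals', 70),
--     ('op_', 'Outpatient', 80),
--     ('obs_unit_', 'Outpatient', 80),
--     ('pay_inp_', 'Payer Mix — Inpatient', 90),
--     ('race_inp_', 'Inpatients by Race', 100),
--     ('days_by_race_', 'Inpatient Days by Race', 110),
--     ('eth_inp_', 'Inpatients by Ethnicity', 120),
--     ('days_by_eth_', 'Inpatient Days by Ethnicity', 130),
--     ('or_rooms_', 'Surgery — OR Class C', 140),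
--     ('or_cases_', 'Surgery — OR Class C', 140),
--     ('or_hours_', 'Surgery — OR Class C', 140),
--     ('procB_', 'Surgery — Class B', 150),
-- ]
--
-- def _first(s: str, rules) -> Optional[Tuple[str, int]]:
--     # first matching prefix; rules are listed in increasing order, so this
--     # is the minimal-order match for this key alone
--     for prefix, label, order in rules:
--         if s.startswith(prefix):
--             return (label, order)
--     return None
--
-- def _best(a, b):
--     if a is None:
--         return b
--     if b is None:
--         return a
--     return a if a[1] <= b[1] else b
--
-- def _hospital_group_for(fid: str, fname: str) -> Tuple[str, int]:
--     # classify each key independently, then keep the group with minimal order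
--     a = _first(fid or '', _FID_RULES)
--     b = _first(fname or '', _NAME_RULES)
--     return _best(a, b) or ('Other', 999)
-- ===== Notes on version B (the rewrite author's own statement) =====
-- stated objective: alternative
-- what changed: Replaces A's single 19-branch mixed cascade with two independent flat prefix classifiers (one over fid, one over fname, each a flat (prefix,label,order) rule list) whose results are merged by minimal order; correctness relies on the cascade's orders being strictly increasing.
import Mathlib
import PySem

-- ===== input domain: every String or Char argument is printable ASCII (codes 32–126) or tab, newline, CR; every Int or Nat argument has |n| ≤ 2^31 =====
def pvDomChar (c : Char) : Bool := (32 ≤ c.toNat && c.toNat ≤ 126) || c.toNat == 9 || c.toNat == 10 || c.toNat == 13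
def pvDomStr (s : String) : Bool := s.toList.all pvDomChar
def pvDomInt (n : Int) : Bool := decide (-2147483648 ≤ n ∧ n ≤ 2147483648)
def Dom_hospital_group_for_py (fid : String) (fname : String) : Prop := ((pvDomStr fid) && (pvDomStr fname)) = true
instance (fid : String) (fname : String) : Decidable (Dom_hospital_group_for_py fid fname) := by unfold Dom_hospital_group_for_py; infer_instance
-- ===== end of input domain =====

-- B classifies fid and fname independently with two flat prefix-rule lists and merges the two
-- results by minimal order (objective: alternative decomposition of the same cascade).

-- ===== PORT A =====
def hospital_group_for_py (fid : String) (fname : String) : String × Int :=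
  let f := if fid == "" then "" else fid
  let n := if fname == "" then "" else fname
  let starts := fun (pxs : List String) => pxs.any (fun px => PySem.Str.startswith f px)
  let name_starts := fun (pxs : List String) => pxs.any (fun px => PySem.Str.startswith n px)
  if starts ["facility."] || name_starts ["facility_", "address_", "license_", "fein"] then ("Facility", 10)
  else
  if starts ["ownership."] || name_starts ["ownership_", "operator_", "plant_owner"] then ("Ownership", 20)
  else
  if starts ["cms.", "hospital.characterization", "chna."] || name_starts ["cms_", "hospital_characterization", "chna_"] then ("Organization & Certification", 30)
  else
  if starts ["mgmt.contracts"] || name_starts ["mgmt_"] then ("Management Contracts", 40)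
  else
  if starts ["utilization.med_surg"] || name_starts ["med_surg_"] then ("Utilization — Medical-Surgical", 50)
  else
  if starts ["utilization.icu"] || name_starts ["icu_"] then ("Utilization — ICU", 55)
  else
  if starts ["utilization.ob_gyn"] || name_starts ["ob_", "gyn_", "obgyn_"] then ("Utilization — OB/GYN", 57)
  else
  if starts ["utilization.pediatrics"] || name_starts ["peds_", "pediatric_"] then ("Utilization — Pediatrics", 58)
  else
  if starts ["utilization.nicu"] || name_starts ["nicu_", "nn_icu_"] then ("Utilization — NICU", 59)
  else
  if name_starts ["ltc_", "swing_"] then ("Utilization — Long-Term Care & Swing", 60)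
  else
  if name_starts ["total_"] then ("Totals", 70)
  else
  if name_starts ["op_", "obs_unit_"] then ("Outpatient", 80)
  else
  if name_starts ["pay_inp_"] then ("Payer Mix — Inpatient", 90)
  else
  if starts ["inpatients_by_race"] || name_starts ["race_inp_"] then ("Inpatients by Race", 100)
  else
  if starts ["inpatient_days_by_race"] || name_starts ["days_by_race_"] then ("Inpatient Days by Race", 110)
  else
  if starts ["inpatients_by_ethnicity"] || name_starts ["eth_inp_"] then ("Inpatients by Ethnicity", 120)
  else
  if starts ["inpatient_days_by_ethnicity"] || name_starts ["days_by_eth_"] then ("Inpatient Days by Ethnicity", 130)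
  else
  if starts ["surgery.or_class_c"] || name_starts ["or_rooms_", "or_cases_", "or_hours_"] then ("Surgery — OR Class C", 140)
  else
  if starts ["surgery.class_b"] || name_starts ["procB_"] then ("Surgery — Class B", 150)
  else
  ("Other", 999)

-- ===== PORT B =====
def pvFidRules : List (String × String × Int) := [
  ("facility.", "Facility", 10),
  ("ownership.", "Ownership", 20),
  ("cms.", "Organization & Certification", 30),
  ("hospital.characterization", "Organization & Certification", 30),
  ("chna.", "Organization & Certification", 30),
  ("mgmt.contracts", "Management Contracts", 40),
  ("utilization.med_surg", "Utilization — Medical-Surgical", 50),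
  ("utilization.icu", "Utilization — ICU", 55),
  ("utilization.ob_gyn", "Utilization — OB/GYN", 57),
  ("utilization.pediatrics", "Utilization — Pediatrics", 58),
  ("utilization.nicu", "Utilization — NICU", 59),
  ("inpatients_by_race", "Inpatients by Race", 100),
  ("inpatient_days_by_race", "Inpatient Days by Race", 110),
  ("inpatients_by_ethnicity", "Inpatients by Ethnicity", 120),
  ("inpatient_days_by_ethnicity", "Inpatient Days by Ethnicity", 130),
  ("surgery.or_class_c", "Surgery — OR Class C", 140),
  ("surgery.class_b", "Surgery — Class B", 150)]

def pvNameRules : List (String × String × Int) := [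
  ("facility_", "Facility", 10),
  ("address_", "Facility", 10),
  ("license_", "Facility", 10),
  ("fein", "Facility", 10),
  ("ownership_", "Ownership", 20),
  ("operator_", "Ownership", 20),
  ("plant_owner", "Ownership", 20),
  ("cms_", "Organization & Certification", 30),
  ("hospital_characterization", "Organization & Certification", 30),
  ("chna_", "Organization & Certification", 30),
  ("mgmt_", "Management Contracts", 40),
  ("med_surg_", "Utilization — Medical-Surgical", 50),
  ("icu_", "Utilization — ICU", 55),
  ("ob_", "Utilization — OB/GYN", 57),
  ("gyn_", "Utilization — OB/GYN", 57),
  ("obgyn_", "Utilization — OB/GYN", 57),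
  ("peds_", "Utilization — Pediatrics", 58),
  ("pediatric_", "Utilization — Pediatrics", 58),
  ("nicu_", "Utilization — NICU", 59),
  ("nn_icu_", "Utilization — NICU", 59),
  ("ltc_", "Utilization — Long-Term Care & Swing", 60),
  ("swing_", "Utilization — Long-Term Care & Swing", 60),
  ("total_", "Totals", 70),
  ("op_", "Outpatient", 80),
  ("obs_unit_", "Outpatient", 80),
  ("pay_inp_", "Payer Mix — Inpatient", 90),
  ("race_inp_", "Inpatients by Race", 100),
  ("days_by_race_", "Inpatient Days by Race", 110),
  ("eth_inp_", "Inpatients by Ethnicity", 120),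
  ("days_by_eth_", "Inpatient Days by Ethnicity", 130),
  ("or_rooms_", "Surgery — OR Class C", 140),
  ("or_cases_", "Surgery — OR Class C", 140),
  ("or_hours_", "Surgery — OR Class C", 140),
  ("procB_", "Surgery — Class B", 150)]

-- Source B's _first: first matching prefix in a flat rule list
def pvFirst (s : String) : List (String × String × Int) → Option (String × Int)
  | [] => none
  | (p, l, o) :: rest => if PySem.Str.startswith s p then some (l, o) else pvFirst s rest

-- Source B's _best: keep the result with minimal order (fid side on tie)
def pvBest : Option (String × Int) → Option (String × Int) → Option (String × Int)
  | none, b => b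
  | some a, none => some a
  | some a, some b => some (if a.2 ≤ b.2 then a else b)

def hospital_group_for_py_alt (fid : String) (fname : String) : String × Int :=
  let a := pvFirst (if fid == "" then "" else fid) pvFidRules
  let b := pvFirst (if fname == "" then "" else fname) pvNameRules
  (pvBest a b).getD ("Other", 999)

-- ===== PRECONDITION & SPEC =====
def Spec_hospital_group_for_py (fid : String) (fname : String) (out : String × Int) : Prop := out = hospital_group_for_py_alt fid fname
instance (fid : String) (fname : String) (out : String × Int) : Decidable (Spec_hospital_group_for_py fid fname out) := by unfold Spec_hospital_group_for_py; infer_instance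

-- ===== CLAIM (what is proved, stated in full; the proofs are below) =====
def Claim_equal_hospital_group_for_py : Prop := ∀ (fid : String) (fname : String), Dom_hospital_group_for_py fid fname → Spec_hospital_group_for_py fid fname (hospital_group_for_py fid fname)

-- ===== LEMMAS AND PROOFS =====

-- A's cascade as one row table: (fid prefixes, name prefixes, label, order)
def pvRows : List (List String × List String × String × Int) := [
  (["facility."], ["facility_", "address_", "license_", "fein"], "Facility", 10),
  (["ownership."], ["ownership_", "operator_", "plant_owner"], "Ownership", 20),
  (["cms.", "hospital.characterization", "chna."], ["cms_", "hospital_characterization", "chna_"], "Organization & Certification", 30),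
  (["mgmt.contracts"], ["mgmt_"], "Management Contracts", 40),
  (["utilization.med_surg"], ["med_surg_"], "Utilization — Medical-Surgical", 50),
  (["utilization.icu"], ["icu_"], "Utilization — ICU", 55),
  (["utilization.ob_gyn"], ["ob_", "gyn_", "obgyn_"], "Utilization — OB/GYN", 57),
  (["utilization.pediatrics"], ["peds_", "pediatric_"], "Utilization — Pediatrics", 58),
  (["utilization.nicu"], ["nicu_", "nn_icu_"], "Utilization — NICU", 59),
  ([], ["ltc_", "swing_"], "Utilization — Long-Term Care & Swing", 60),
  ([], ["total_"], "Totals", 70),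
  ([], ["op_", "obs_unit_"], "Outpatient", 80),
  ([], ["pay_inp_"], "Payer Mix — Inpatient", 90),
  (["inpatients_by_race"], ["race_inp_"], "Inpatients by Race", 100),
  (["inpatient_days_by_race"], ["days_by_race_"], "Inpatient Days by Race", 110),
  (["inpatients_by_ethnicity"], ["eth_inp_"], "Inpatients by Ethnicity", 120),
  (["inpatient_days_by_ethnicity"], ["days_by_eth_"], "Inpatient Days by Ethnicity", 130),
  (["surgery.or_class_c"], ["or_rooms_", "or_cases_", "or_hours_"], "Surgery — OR Class C", 140),
  (["surgery.class_b"], ["procB_"], "Surgery — Class B", 150)]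

def pvChain (f n : String) : List (List String × List String × String × Int) → String × Int
  | [] => ("Other", 999)
  | (fps, nps, l, o) :: rest =>
      if fps.any (fun p => PySem.Str.startswith f p) || nps.any (fun p => PySem.Str.startswith n p)
      then (l, o) else pvChain f n rest

def pvScanF (f : String) : List (List String × List String × String × Int) → Option (String × Int)
  | [] => none
  | (fps, _, l, o) :: rest =>
      if fps.any (fun p => PySem.Str.startswith f p) then some (l, o) else pvScanF f rest

def pvScanN (n : String) : List (List String × List String × String × Int) → Option (String × Int)
  | [] => none
  | (_, nps, l, o) :: rest =>
      if nps.any (fun p => PySem.Str.startswith n p) then some (l, o) else pvScanN n rest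

def pvFlatF (rows : List (List String × List String × String × Int)) : List (String × String × Int) :=
  rows.flatMap (fun r => r.1.map (fun p => (p, r.2.2.1, r.2.2.2)))

def pvFlatN (rows : List (List String × List String × String × Int)) : List (String × String × Int) :=
  rows.flatMap (fun r => r.2.1.map (fun p => (p, r.2.2.1, r.2.2.2)))

theorem pvFirst_map_append (s : String) (l : String) (o : Int) (xs : List String) (ys : List (String × String × Int)) :
    pvFirst s (xs.map (fun p => (p, l, o)) ++ ys) =
      if xs.any (fun p => PySem.Str.startswith s p) then some (l, o) else pvFirst s ys := by
  induction xs with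
  | nil => simp
  | cons x xs ih =>
      simp only [List.map_cons, List.cons_append, List.any_cons, pvFirst, ih]
      by_cases hx : PySem.Str.startswith s x = true
      · rw [if_pos hx, if_pos (by rw [hx, Bool.true_or])]
      · have hx' : PySem.Str.startswith s x = false := by
          revert hx; cases PySem.Str.startswith s x <;> simp
        rw [if_neg hx]; simp only [hx', Bool.false_or]

theorem pvFirst_flatF (f : String) (rows : List (List String × List String × String × Int)) :
    pvFirst f (pvFlatF rows) = pvScanF f rows := by
  induction rows with
  | nil => simp [pvFlatF, pvFirst, pvScanF]
  | cons r rest ih =>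
      obtain ⟨fps, nps, l, o⟩ := r
      simp only [pvFlatF, List.flatMap_cons, pvScanF] at *
      rw [pvFirst_map_append, ih]

theorem pvFirst_flatN (n : String) (rows : List (List String × List String × String × Int)) :
    pvFirst n (pvFlatN rows) = pvScanN n rows := by
  induction rows with
  | nil => simp [pvFlatN, pvFirst, pvScanN]
  | cons r rest ih =>
      obtain ⟨fps, nps, l, o⟩ := r
      simp only [pvFlatN, List.flatMap_cons, pvScanN] at *
      rw [pvFirst_map_append, ih]

theorem pvScanF_order (f : String) (rows : List (List String × List String × String × Int)) (x : String × Int)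
    (h : pvScanF f rows = some x) : ∃ r ∈ rows, x.2 = r.2.2.2 := by
  induction rows with
  | nil => simp [pvScanF] at h
  | cons r rest ih =>
      obtain ⟨fps, nps, l, o⟩ := r
      simp only [pvScanF] at h
      split at h
      · exact ⟨(fps, nps, l, o), by simp, by cases h; rfl⟩
      · obtain ⟨r', hr', hx⟩ := ih h
        exact ⟨r', List.mem_cons_of_mem _ hr', hx⟩

theorem pvScanN_order (n : String) (rows : List (List String × List String × String × Int)) (x : String × Int)
    (h : pvScanN n rows = some x) : ∃ r ∈ rows, x.2 = r.2.2.2 := by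
  induction rows with
  | nil => simp [pvScanN] at h
  | cons r rest ih =>
      obtain ⟨fps, nps, l, o⟩ := r
      simp only [pvScanN] at h
      split at h
      · exact ⟨(fps, nps, l, o), by simp, by cases h; rfl⟩
      · obtain ⟨r', hr', hx⟩ := ih h
        exact ⟨r', List.mem_cons_of_mem _ hr', hx⟩

-- orders strictly increase along the table
def pvOrdered (rows : List (List String × List String × String × Int)) : Prop :=
  rows.Pairwise (fun a b => a.2.2.2 < b.2.2.2)

theorem pvBest_scan (f n : String) (rows : List (List String × List String × String × Int))
    (hord : pvOrdered rows) :
    (pvBest (pvScanF f rows) (pvScanN n rows)).getD ("Other", 999) = pvChain f n rows := by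
  induction rows with
  | nil => simp [pvScanF, pvScanN, pvBest, pvChain]
  | cons r rest ih =>
      obtain ⟨fps, nps, l, o⟩ := r
      have hlt : ∀ r' ∈ rest, o < r'.2.2.2 := (List.pairwise_cons.mp hord).1
      have hord' : pvOrdered rest := (List.pairwise_cons.mp hord).2
      simp only [pvScanF, pvScanN, pvChain]
      cases hf : fps.any (fun p => PySem.Str.startswith f p) <;>
        cases hn : nps.any (fun p => PySem.Str.startswith n p) <;>
        simp only [Bool.or_self, Bool.false_or, Bool.or_false, reduceIte]
      · exact ih hord'
      · cases hF : pvScanF f rest with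
        | none => simp [pvBest]
        | some x =>
            obtain ⟨r', hr', hx⟩ := pvScanF_order f rest x hF
            have h2 : ¬ x.2 ≤ o := not_le.mpr (hx ▸ hlt r' hr')
            simp [pvBest, h2]
      · cases hN : pvScanN n rest with
        | none => simp [pvBest]
        | some y =>
            obtain ⟨r', hr', hy⟩ := pvScanN_order n rest y hN
            have h2 : o ≤ y.2 := le_of_lt (hy ▸ hlt r' hr')
            simp [pvBest, h2]
      · simp [pvBest]

theorem pvRows_ordered : pvOrdered pvRows := by
  unfold pvOrdered pvRows; decide

theorem pvFlatF_rows : pvFidRules = pvFlatF pvRows := by decide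
theorem pvFlatN_rows : pvNameRules = pvFlatN pvRows := by decide

theorem pvOrEmpty (s : String) : (if s == "" then "" else s) = s := by
  by_cases h : s = "" <;> simp [h]

theorem pvA_chain (fid fname : String) :
    hospital_group_for_py fid fname = pvChain fid fname pvRows := by
  unfold hospital_group_for_py pvRows
  simp only [pvChain, pvOrEmpty, List.any_cons, List.any_nil, Bool.or_false, Bool.false_or]

-- ===== VERDICT (by name: the statement is the Claim_ definition above) =====
set_option maxHeartbeats 2000000 in
theorem hospital_group_for_py_spec : Claim_equal_hospital_group_for_py := by
  intro fid fname _
  unfold Spec_hospital_group_for_py hospital_group_for_py_alt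
  rw [pvOrEmpty, pvOrEmpty, pvFlatF_rows, pvFlatN_rows, pvFirst_flatF, pvFirst_flatN,
    pvBest_scan fid fname pvRows pvRows_ordered, pvA_chain]
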